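-- pv_equiv track=rewrite | github.com/jtiagosantos/uri-solutions | [1] BEGINNER/2812 - Laércio.py | ordenacao
-- ===== SOURCE A (Python) =====
-- def ordenacao(lista):
--     array = []
--     for k, v in enumerate(lista[::]):
--         if k % 2 == 0:
--             array.append(max(lista))
--             lista.remove(max(lista))
--         else:
--             array.append(min(lista))
--             lista.remove(min(lista))
--     return array
-- ===== SOURCE B (Python) =====
-- def ordenacao(lista):
--     s = sorted(lista)
--     res = []
--     take_high = True
--     while s:
--         if take_high:
--             res.append(s.pop())    # largest remaining
--         else:
--             res.append(s.pop(0))   # smallest remaining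
--         take_high = not take_high
--     return res
-- ===== Notes on version B (the rewrite author's own statement) =====
-- stated objective: faster
-- what changed: B sorts the list once and then alternately peels the largest element off the back and the smallest off the front of the sorted list, replacing A's per-iteration max()/min() rescans and remove() searches.
import Mathlib
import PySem

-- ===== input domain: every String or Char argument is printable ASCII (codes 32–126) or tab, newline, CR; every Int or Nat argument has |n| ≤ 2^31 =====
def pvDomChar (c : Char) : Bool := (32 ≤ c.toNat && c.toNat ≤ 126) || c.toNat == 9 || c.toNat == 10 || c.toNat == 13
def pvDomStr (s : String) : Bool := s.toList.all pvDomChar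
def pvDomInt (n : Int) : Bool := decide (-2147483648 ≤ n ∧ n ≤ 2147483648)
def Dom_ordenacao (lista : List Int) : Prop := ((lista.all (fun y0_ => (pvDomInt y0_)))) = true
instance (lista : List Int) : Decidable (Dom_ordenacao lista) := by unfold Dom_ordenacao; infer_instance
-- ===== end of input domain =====

-- B sorts once and then alternately peels the largest/smallest element off the two ends of
-- the sorted list, instead of A's repeated max()/min() scans with remove(); return-value
-- equivalence only: A empties its argument list in place, B does not mutate it.

-- ===== PORT A =====
-- loop of A: fold over enumerate(lista[::]) carrying the mutated lista and the array.
-- The 'none' fallbacks are unreachable: the enumerate list has exactly lista's length, so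
-- the remaining list is nonempty at every step and max()/min() never sees an empty list.
def ordenacaoGo : List (Int × Int) → List Int → List Int → List Int
  | [], _, array => array
  | (k, _) :: rest, l, array =>
    if PySem.Int.mod k 2 == 0 then
      match PySem.List.max? l (fun x => x) with
      | some m =>
        match PySem.List.remove? l m with
        | some l' => ordenacaoGo rest l' (array ++ [m])
        | none => array ++ [m]
      | none => array
    else
      match PySem.List.min? l (fun x => x) with
      | some m =>
        match PySem.List.remove? l m with
        | some l' => ordenacaoGo rest l' (array ++ [m])
        | none => array ++ [m]
      | none => array

def ordenacao (lista : List Int) : List Int :=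
  ordenacaoGo (PySem.List.enumerate (PySem.List.slice lista none none) 0) lista []

-- ===== PORT B =====
-- while s: pop from the back (take_high) or from the front, alternating.
def ordenacaoPeel (s : List Int) (res : List Int) (takeHigh : Bool) : List Int :=
  match h : s with
  | [] => res
  | x :: xs =>
    if takeHigh then
      ordenacaoPeel s.dropLast (res ++ [s.getLast (by simp [h])]) false
    else
      ordenacaoPeel xs (res ++ [x]) true
termination_by s.length
decreasing_by
  · simp [h]
  · simp

def ordenacao_alt (lista : List Int) : List Int :=
  ordenacaoPeel (PySem.List.sorted lista (fun x => x) false) [] true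



-- ===== PRECONDITION & SPEC =====
def Spec_ordenacao (lista : List Int) (out : List Int) : Prop := out = ordenacao_alt lista
instance (lista : List Int) (out : List Int) : Decidable (Spec_ordenacao lista out) := by unfold Spec_ordenacao; infer_instance

-- ===== CLAIM (what is proved, stated in full; the proofs are below) =====
def Claim_equal_ordenacao : Prop := ∀ (lista : List Int), Dom_ordenacao lista → Spec_ordenacao lista (ordenacao lista)

-- ===== LEMMAS AND PROOFS =====
def msort (l : List Int) : List Int := PySem.List.sorted l (fun x => x) false

lemma msort_pw (l : List Int) : (msort l).Pairwise (· ≤ ·) := by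
  simpa [msort] using PySem.List.sorted_pairwise (xs := l) (key := fun x => x)

lemma msort_perm (l : List Int) : (msort l).Perm l := PySem.List.sorted_perm l _ _

lemma msort_ne_nil {l : List Int} (hl : l ≠ []) : msort l ≠ [] := by
  simp [msort, PySem.List.sorted_eq_nil_iff, hl]

lemma max_eq_getLast (l : List Int) (hl : l ≠ []) (hs : msort l ≠ []) :
    PySem.List.max? l (fun x => x) = some ((msort l).getLast hs) := by
  rcases h : PySem.List.max? l (fun x => x) with _ | m
  · rw [PySem.List.max?_eq_none_iff] at h; exact absurd h hl
  have hmem := PySem.List.max?_mem h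
  have hmax := PySem.List.max?_isMax h
  have hg_mem : (msort l).getLast hs ∈ l :=
    (PySem.List.mem_sorted _ _ _ _).1 (List.getLast_mem hs)
  have hm_mem_s : m ∈ msort l := (PySem.List.mem_sorted _ _ _ _).2 hmem
  have h1 : m ≤ (msort l).getLast hs := (msort_pw l).rel_getLast hm_mem_s
  have h2 : (msort l).getLast hs ≤ m := hmax _ hg_mem
  rw [le_antisymm h1 h2]

lemma min_eq_head (l : List Int) (hl : l ≠ []) (hs : msort l ≠ []) :
    PySem.List.min? l (fun x => x) = some ((msort l).head hs) := by
  rcases h : PySem.List.min? l (fun x => x) with _ | m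
  · rw [PySem.List.min?_eq_none_iff] at h; exact absurd h hl
  have hmem := PySem.List.min?_mem h
  have hmin := PySem.List.min?_isMin h
  have hcons : PySem.List.sorted l (fun x => x) = (msort l).head hs :: (msort l).tail := by
    rw [List.cons_head_tail hs]; rfl
  have hhead := PySem.List.key_head_sorted_le l (fun x => x) hcons
  have hh_mem : (msort l).head hs ∈ l := (PySem.List.mem_sorted _ _ _ _).1 (List.head_mem hs)
  rw [le_antisymm (hmin _ hh_mem) (hhead m hmem)]

lemma perm_erase_last (s : List Int) (hs : s ≠ []) (m : Int) (hm : s.getLast hs = m) :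
    (s.erase m).Perm s.dropLast := by
  have hsplit : s.dropLast ++ [m] = s := hm ▸ List.dropLast_concat_getLast hs
  by_cases hmem : m ∈ s.dropLast
  · have h1 : s.erase m = s.dropLast.erase m ++ [m] := by
      conv_lhs => rw [← hsplit]
      rw [List.erase_append, if_pos hmem]
    rw [h1]
    exact (List.perm_append_singleton _ _).trans (List.perm_cons_erase hmem).symm
  · have h1 : s.erase m = s.dropLast := by
      conv_lhs => rw [← hsplit]
      rw [List.erase_append, if_neg hmem]; simp
    rw [h1]

lemma msort_erase_getLast (l : List Int) (hs : msort l ≠ []) :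
    msort (l.erase ((msort l).getLast hs)) = (msort l).dropLast := by
  apply PySem.List.sorted_id_eq_of_perm_of_pairwise
  · exact (perm_erase_last (msort l) hs _ rfl).symm.trans ((msort_perm l).erase _)
  · exact (msort_pw l).sublist (List.dropLast_sublist _)

lemma perm_head_tail (s : List Int) (hs : s ≠ []) (m : Int) (hm : s.head hs = m) :
    s.tail.Perm (s.erase m) := by
  have hsplit : m :: s.tail = s := hm ▸ List.cons_head_tail hs
  have h1 : s.erase m = s.tail := by
    conv_lhs => rw [← hsplit]
    rw [List.erase_cons_head]
  rw [h1]

lemma msort_erase_head (l : List Int) (hs : msort l ≠ []) :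
    msort (l.erase ((msort l).head hs)) = (msort l).tail := by
  apply PySem.List.sorted_id_eq_of_perm_of_pairwise
  · exact (perm_head_tail (msort l) hs _ rfl).trans ((msort_perm l).erase _)
  · exact (msort_pw l).sublist (List.tail_sublist _)

lemma parity_flip (k : Int) :
    (PySem.Int.mod (k+1) 2 == 0) = !(PySem.Int.mod k 2 == 0) := by
  rw [PySem.Int.mod_eq_emod_of_pos (by omega), PySem.Int.mod_eq_emod_of_pos (by omega)]
  by_cases h : k % 2 = 0
  · simp [h, show (k+1) % 2 = 1 by omega]
  · simp [show k % 2 = 1 by omega, show (k+1) % 2 = 0 by omega]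

lemma max_concat (l : List Int) (hl : l ≠ []) (ys : List Int) (m : Int)
    (hc : msort l = ys ++ [m]) :
    PySem.List.max? l (fun x => x) = some m := by
  have hs : msort l ≠ [] := msort_ne_nil hl
  have h1 := max_eq_getLast l hl hs
  have h2 : (msort l).getLast hs = m := by
    simp [List.getLast_congr _ _ hc]
  rw [h1, h2]

lemma min_cons (l : List Int) (hl : l ≠ []) (m : Int) (t : List Int)
    (hc : msort l = m :: t) :
    PySem.List.min? l (fun x => x) = some m := by
  have hs : msort l ≠ [] := msort_ne_nil hl
  have h1 := min_eq_head l hl hs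
  have h2 : (msort l).head hs = m := by
    simp [hc]
  rw [h1, h2]

lemma msort_erase_concat (l : List Int) (hl : l ≠ []) (ys : List Int) (m : Int)
    (hc : msort l = ys ++ [m]) :
    msort (l.erase m) = ys := by
  have hs : msort l ≠ [] := msort_ne_nil hl
  have h2 : (msort l).getLast hs = m := by
    simp [List.getLast_congr _ _ hc]
  have h1 := msort_erase_getLast l hs
  rw [h2] at h1
  rw [h1, hc, List.dropLast_concat]

lemma msort_erase_cons (l : List Int) (hl : l ≠ []) (m : Int) (t : List Int)
    (hc : msort l = m :: t) :
    msort (l.erase m) = t := by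
  have hs : msort l ≠ [] := msort_ne_nil hl
  have h2 : (msort l).head hs = m := by
    simp [hc]
  have h1 := msort_erase_head l hs
  rw [h2] at h1
  rw [h1, hc, List.tail_cons]

lemma peel_concat_true (ys : List Int) (m : Int) (res : List Int) :
    ordenacaoPeel (ys ++ [m]) res true = ordenacaoPeel ys (res ++ [m]) false := by
  rw [ordenacaoPeel.eq_def]
  split
  · rename_i h; exact absurd h (by simp)
  · simp

lemma peel_cons_false (m : Int) (t : List Int) (res : List Int) :
    ordenacaoPeel (m :: t) res false = ordenacaoPeel t (res ++ [m]) true := by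
  rw [ordenacaoPeel.eq_def]
  simp

lemma go_eq (vs : List Int) : ∀ (k : Int) (l acc : List Int), vs.length = l.length →
    ordenacaoGo (PySem.List.enumerate vs k) l acc
      = ordenacaoPeel (msort l) acc (PySem.Int.mod k 2 == 0) := by
  induction vs with
  | nil =>
    intro k l acc hlen
    have hl : l = [] := by
      have := hlen.symm; simpa [List.length_eq_zero_iff] using this
    subst hl
    have hm : msort ([] : List Int) = [] := by
      simp [msort, PySem.List.sorted_eq_nil_iff]
    rw [hm]
    simp [PySem.List.enumerate_nil, ordenacaoGo, ordenacaoPeel]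
  | cons v vs ih =>
    intro k l acc hlen
    have hl : l ≠ [] := by
      intro h; subst h; simp at hlen
    have hs : msort l ≠ [] := msort_ne_nil hl
    rw [PySem.List.enumerate_cons]
    by_cases hb : (PySem.Int.mod k 2 == 0) = true
    · obtain ⟨ys, m, hc⟩ : ∃ ys m, msort l = ys ++ [m] := by
        rcases List.eq_nil_or_concat (msort l) with h | ⟨ys, m, h⟩
        · exact absurd h hs
        · exact ⟨ys, m, by simpa [List.concat_eq_append] using h⟩
      have hmax := max_concat l hl ys m hc
      have hmem : m ∈ l := PySem.List.max?_mem hmax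
      have hrem := PySem.List.remove?_eq_some_erase l m hmem
      have hlen' : vs.length = (l.erase m).length := by
        rw [List.length_erase_of_mem hmem]
        simp at hlen; omega
      simp only [ordenacaoGo, hb, if_true, hmax, hrem]
      rw [ih (k+1) _ _ hlen', msort_erase_concat l hl ys m hc, parity_flip k, hb,
        Bool.not_true, hc, peel_concat_true]
    · have hbf : (PySem.Int.mod k 2 == 0) = false := by simpa using hb
      obtain ⟨m, t, hc⟩ : ∃ m t, msort l = m :: t := by
        rcases h : msort l with _ | ⟨m, t⟩
        · exact absurd h hs
        · exact ⟨m, t, rfl⟩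
      have hmin := min_cons l hl m t hc
      have hmem : m ∈ l := PySem.List.min?_mem hmin
      have hrem := PySem.List.remove?_eq_some_erase l m hmem
      have hlen' : vs.length = (l.erase m).length := by
        rw [List.length_erase_of_mem hmem]
        simp at hlen; omega
      simp only [ordenacaoGo, hbf, Bool.false_eq_true, if_false, hmin, hrem]
      rw [ih (k+1) _ _ hlen', msort_erase_cons l hl m t hc, parity_flip k, hbf,
        Bool.not_false, hc, peel_cons_false]


-- ===== VERDICT (by name: the statement is the Claim_ definition above) =====
theorem ordenacao_spec : Claim_equal_ordenacao := by
  intro lista _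
  unfold Spec_ordenacao ordenacao ordenacao_alt
  rw [PySem.List.slice_none_none]
  rw [go_eq lista 0 lista [] rfl]
  rfl
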